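-- pv_equiv track=rewrite | github.com/zzarru/AlToBeat | zzarru/week21/PGS_120882_lv0_등수매기기.py | solution
-- ===== SOURCE A (Python) =====
-- def solution(score):
--     # 1 idx와 함께 합계 저장
--     total_dic = {}
--     idx = 0
--     for s in score:
--         total_dic[idx] = sum(s)
--         idx += 1
--
--     # 2 값을 가지고 정렬
--     total_sorted = sorted(total_dic.items(), key=lambda item: item[1], reverse=True)
--
--     # 3 등수 매기기
--     num_before = -1  # 이전 값 저장해서 같은 값인지 비교하기
--     rank = 0  # 순위
--     cnt = 0  # 중복 등수 있을 경우 패스하는 카운트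
--     rank_dic = {}
--     for total in total_sorted:
--         if num_before != total[1]:
--             rank = rank + cnt + 1
--             num_before = total[1]
--             rank_dic[total[0]] = rank
--             cnt = 0
--
--         else:
--             rank_dic[total[0]] = rank
--             cnt += 1
--
--     # 4 key 값으로 정렬하기
--     sorted_rank = sorted(rank_dic.items(), key=lambda item: item[0])
--
--     # 5 값 출력하기
--     answer = []
--     for ans in sorted_rank:
--         answer.append(ans[1])
--     return answer
-- ===== SOURCE B (Python) =====
-- def solution(score):
--     totals = [sum(s) for s in score]
--     return [1 + sum(1 for u in totals if u > t) for t in totals]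
-- ===== Notes on version B (the rewrite author's own statement) =====
-- stated objective: simpler
-- what changed: Replaces A's dict-building, descending sort, sequential skip-counter rank assignment and re-sort by key with a direct two-line strictly-greater count over the list of row sums.
-- intended difference: On inputs whose maximal row sum is exactly -1, A's sentinel num_before=-1 makes every top-ranked row get rank 0, while B gives the intended competition rank 1; all other rows agree. — e.g. on solution([[-1]]): A returns [0], B returns [1]
import Mathlib
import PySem

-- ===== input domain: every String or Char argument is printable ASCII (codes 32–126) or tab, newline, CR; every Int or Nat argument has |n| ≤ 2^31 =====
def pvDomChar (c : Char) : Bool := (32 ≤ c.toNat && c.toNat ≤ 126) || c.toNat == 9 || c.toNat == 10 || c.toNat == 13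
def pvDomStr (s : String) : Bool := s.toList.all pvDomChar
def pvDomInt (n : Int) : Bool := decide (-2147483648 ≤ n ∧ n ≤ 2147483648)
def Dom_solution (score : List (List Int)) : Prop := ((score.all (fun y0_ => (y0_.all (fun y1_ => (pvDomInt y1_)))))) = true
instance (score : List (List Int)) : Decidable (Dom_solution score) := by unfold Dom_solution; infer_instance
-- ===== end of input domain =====

-- B replaces A's dict/sort/skip-counter ranking with a direct strictly-greater count (simpler); on inputs whose
-- maximal row sum is -1, A's sentinel num_before=-1 yields rank 0 at the top while B returns the intended rank 1 (D_ below).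


-- ===== PORT A =====
-- sum(s)
def pySum (s : List Int) : Int := s.foldl (· + ·) 0

-- the body of A's ranking loop: state (num_before, rank, cnt, rank_dic)
def pvRankStep (st : Int × Int × Int × PySem.Dict Int Int) (total : Int × Int) :
    Int × Int × Int × PySem.Dict Int Int :=
  if st.1 ≠ total.2 then
    (total.2, st.2.1 + st.2.2.1 + 1, 0, st.2.2.2.insert total.1 (st.2.1 + st.2.2.1 + 1))
  else
    (st.1, st.2.1, st.2.2.1 + 1, st.2.2.2.insert total.1 st.2.1)

def solution (score : List (List Int)) : List Int :=
  -- 1: total_dic[idx] = sum(s)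
  let st := score.foldl (fun (st : PySem.Dict Int Int × Int) s =>
    (st.1.insert st.2 (pySum s), st.2 + 1)) (PySem.Dict.empty, 0)
  -- 2: sort by value, descending
  let total_sorted := PySem.List.sorted st.1.items (fun item => item.2) true
  -- 3: assign ranks with the duplicate counter
  let fin := total_sorted.foldl pvRankStep (-1, 0, 0, PySem.Dict.empty)
  -- 4: sort by key
  let sorted_rank := PySem.List.sorted fin.2.2.2.items (fun item => item.1) false
  -- 5: collect the values
  sorted_rank.foldl (fun answer ans => answer ++ [ans.2]) []

-- ===== PORT B =====
def solution_alt (score : List (List Int)) : List Int :=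
  let totals := score.map (fun s => s.foldl (· + ·) 0)
  totals.map (fun t => 1 + (totals.countP (fun u => decide (t < u)) : Int))

-- ===== PRECONDITION & SPEC =====
-- On inputs whose maximal row sum is exactly -1, A's sentinel num_before = -1 makes every top-ranked row
-- get rank 0, while B gives the intended competition rank 1; all other rows agree.
def D_solution (score : List (List Int)) : Prop :=
  score ≠ [] ∧ (∀ s ∈ score, s.sum ≤ -1) ∧ (∃ s ∈ score, s.sum = -1)
instance (score : List (List Int)) : Decidable (D_solution score) := by unfold D_solution; infer_instance

def Spec_solution (score : List (List Int)) (out : List Int) : Prop :=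
  ¬ D_solution score → out = solution_alt score
instance (score : List (List Int)) (out : List Int) : Decidable (Spec_solution score out) := by
  unfold Spec_solution; infer_instance

def pvDiffWitness_solution : List (List Int) := [[-1]]
def pvDiffWitnessOut_solution : (List Int) × (List Int) := ([0], [1])

-- ===== CLAIM (what is proved, stated in full; the proofs are below) =====
def Claim_unchanged_solution : Prop :=
  ∀ (score : List (List Int)), Dom_solution score → Spec_solution score (solution score)
def Claim_changed_solution : Prop :=
  Dom_solution (pvDiffWitness_solution) ∧ D_solution (pvDiffWitness_solution) ∧
  solution (pvDiffWitness_solution) = pvDiffWitnessOut_solution.1 ∧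
  solution_alt (pvDiffWitness_solution) = pvDiffWitnessOut_solution.2 ∧
  pvDiffWitnessOut_solution.1 ≠ pvDiffWitnessOut_solution.2

def Claim_exact_solution : Prop :=
  ∀ (score : List (List Int)), Dom_solution score → D_solution score →
    solution score ≠ solution_alt score

-- ===== LEMMAS AND PROOFS =====

-- (i, t0), (i+1, t1), … : the items of A's first dict
def pvPairs : List Int → Int → List (Int × Int)
  | [], _ => []
  | t :: ts, i => (i, t) :: pvPairs ts (i + 1)

-- the competition rank of value v within L
def pvG (L : List (Int × Int)) (v : Int) : Int :=
  1 + (L.countP (fun p => decide (v < p.2)) : Int)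

lemma pvPairs_fst_ge : ∀ (ts : List Int) (i : Int), ∀ p ∈ pvPairs ts i, i ≤ p.1 := by
  intro ts
  induction ts with
  | nil => intro i p hp; simp [pvPairs] at hp
  | cons t ts ih =>
    intro i p hp
    rcases List.mem_cons.mp hp with h | h
    · subst h; simp
    · have := ih (i + 1) p h; omega

lemma pvPairs_fst_pairwise (ts : List Int) (i : Int) :
    (pvPairs ts i).Pairwise (fun p q => p.1 < q.1) := by
  induction ts generalizing i with
  | nil => simp [pvPairs]
  | cons t ts ih =>
    refine List.Pairwise.cons ?_ (ih (i + 1))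
    intro q hq
    have := pvPairs_fst_ge ts (i + 1) q hq
    simp; omega

lemma pvPairs_map_snd (ts : List Int) (i : Int) (g : Int → Int) :
    (pvPairs ts i).map (fun p => g p.2) = ts.map g := by
  induction ts generalizing i with
  | nil => rfl
  | cons t ts ih => simp [pvPairs, ih]

lemma pvPairs_countP_snd (ts : List Int) (i : Int) (f : Int → Bool) :
    (pvPairs ts i).countP (fun p => f p.2) = ts.countP f := by
  induction ts generalizing i with
  | nil => rfl
  | cons t ts ih => simp [pvPairs, List.countP_cons, ih]

lemma pvPairs_snd_mem (ts : List Int) (i : Int) : ∀ p ∈ pvPairs ts i, p.2 ∈ ts := by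
  induction ts generalizing i with
  | nil => simp [pvPairs]
  | cons t ts ih =>
    intro p hp
    rcases List.mem_cons.mp hp with h | h
    · subst h; simp
    · exact List.mem_cons_of_mem _ (ih (i + 1) p h)

lemma pvPairs_mem_snd (ts : List Int) (i : Int) : ∀ t ∈ ts, ∃ p ∈ pvPairs ts i, p.2 = t := by
  induction ts generalizing i with
  | nil => simp
  | cons u ts ih =>
    intro t ht
    rcases List.mem_cons.mp ht with h | h
    · exact ⟨(i, u), List.mem_cons_self, h.symm⟩
    · obtain ⟨p, hp, he⟩ := ih (i + 1) t h
      exact ⟨p, List.mem_cons_of_mem _ hp, he⟩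

-- step 1 of A builds exactly pvPairs
lemma pvBuild_items :
    ∀ (score : List (List Int)) (d : PySem.Dict Int Int) (i : Int),
      (∀ k ∈ d.keys, k < i) →
      (score.foldl (fun (st : PySem.Dict Int Int × Int) s =>
        (st.1.insert st.2 (pySum s), st.2 + 1)) (d, i)).1.items
        = d.items ++ pvPairs (score.map pySum) i := by
  intro score
  induction score with
  | nil => intro d i _; simp [pvPairs]
  | cons s rest ih =>
    intro d i hk
    have hfresh : d.contains i = false := by
      rw [PySem.Dict.contains_eq_decide_mem_keys]
      simp only [decide_eq_false_iff_not]
      intro hmem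
      exact absurd (hk i hmem) (lt_irrefl i)
    have hit := PySem.Dict.items_insert_of_not_contains d (pySum s) hfresh
    have hkeys : ∀ k ∈ (d.insert i (pySum s)).keys, k < i + 1 := by
      intro k hkm
      simp only [PySem.Dict.keys, hit, List.map_append, List.mem_append] at hkm
      rcases hkm with h | h
      · have := hk k (by simpa [PySem.Dict.keys] using h); omega
      · simp at h; omega
    simp only [List.foldl_cons, List.map_cons, pvPairs]
    rw [ih (d.insert i (pySum s)) (i + 1) hkeys, hit]
    simp

lemma countP_split (P : List (ℤ × ℤ)) (nb : ℤ) (h : ∀ p ∈ P, nb ≤ p.2) :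
    P.countP (fun p => decide (nb < p.2)) + P.countP (fun p => decide (p.2 = nb)) = P.length := by
  induction P with
  | nil => simp
  | cons a P ih =>
    have ha := h a List.mem_cons_self
    have hrest := ih (fun p hp => h p (List.mem_cons_of_mem _ hp))
    simp only [List.countP_cons, List.length_cons]
    by_cases he : a.2 = nb
    · have : ¬ nb < a.2 := by omega
      simp [he]; omega
    · have : nb < a.2 := lt_of_le_of_ne ha (fun h' => he h'.symm)
      simp [he, this]; omega

lemma pairwise_le_getLast :
    ∀ (P : List (Int × Int)), P.Pairwise (fun a b => b.2 ≤ a.2) →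
      ∀ (hne : P ≠ []), ∀ p ∈ P, (P.getLast hne).2 ≤ p.2 := by
  intro P
  induction P with
  | nil => intro _ hne; exact absurd rfl hne
  | cons a P ih =>
    intro h hne p hp
    rcases List.pairwise_cons.mp h with ⟨ha, hP⟩
    rcases eq_or_ne P [] with hP0 | hP0
    · subst hP0; simp at hp; subst hp; simp
    · rw [List.getLast_cons hP0]
      rcases List.mem_cons.mp hp with h1 | h1
      · subst h1; exact ha _ (List.getLast_mem hP0)
      · exact ih hP hP0 p h1

-- the ranking loop, from any state satisfying the invariant
lemma pvRankLoop (L : List (Int × Int)) (hdesc : L.Pairwise (fun a b => b.2 ≤ a.2))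
    (hnd : (L.map Prod.fst).Nodup) :
    ∀ (S P : List (Int × Int)), L = P ++ S →
      ∀ (nb rank cnt : Int) (d : PySem.Dict Int Int) (hne : P ≠ []),
      nb = (P.getLast hne).2 →
      rank = pvG L nb →
      cnt = (P.countP (fun p => decide (p.2 = nb)) : Int) - 1 →
      d.items = P.map (fun p => (p.1, pvG L p.2)) →
      (S.foldl pvRankStep (nb, rank, cnt, d)).2.2.2.items
        = L.map (fun p => (p.1, pvG L p.2)) := by
  intro S
  induction S with
  | nil =>
    intro P hL nb rank cnt d hne hnb hrank hcnt hd
    subst hL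
    simpa using hd
  | cons q S' ih =>
    intro P hL nb rank cnt d hne hnb hrank hcnt hd
    have hsplit := hdesc
    rw [hL, List.pairwise_append] at hsplit
    obtain ⟨hP, hQS, hPQ⟩ := hsplit
    have hq_le : q.2 ≤ nb := by
      rw [hnb]; exact hPQ _ (List.getLast_mem hne) q List.mem_cons_self
    have hS'le : ∀ x ∈ S', x.2 ≤ q.2 := (List.pairwise_cons.mp hQS).1
    have hPge : ∀ p ∈ P, nb ≤ p.2 := by
      rw [hnb]; exact pairwise_le_getLast P hP hne
    have hkeys : d.keys = P.map Prod.fst := by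
      simp only [PySem.Dict.keys, hd, List.map_map]
      rfl
    have hndL := hnd
    rw [hL, List.map_append] at hndL
    have hq_notin : q.1 ∉ P.map Prod.fst := by
      intro hmem
      exact (List.nodup_append.mp hndL).2.2 q.1 hmem q.1 (by simp) rfl
    have hfresh : d.contains q.1 = false := by
      rw [PySem.Dict.contains_eq_decide_mem_keys, hkeys]
      simpa using hq_notin
    have hglast : ∀ (h' : P ++ [q] ≠ []), ((P ++ [q]).getLast h').2 = q.2 := by
      intro h'; rw [List.getLast_append]; simp
    simp only [List.foldl_cons]
    by_cases hEq : nb = q.2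
    · have hstep : pvRankStep (nb, rank, cnt, d) q = (nb, rank, cnt + 1, d.insert q.1 rank) := by
        simp [pvRankStep, hEq]
      rw [hstep]
      refine ih (P ++ [q]) (by rw [hL]; simp) nb rank (cnt + 1) _ (by simp) ?_ hrank ?_ ?_
      · rw [hglast, hEq]
      · rw [List.countP_append, hcnt]
        have : List.countP (fun p => decide (p.2 = nb)) [q] = 1 := by simp [hEq.symm]
        rw [this]; push_cast; ring
      · rw [PySem.Dict.items_insert_of_not_contains d rank hfresh, hd, List.map_append]
        have : rank = pvG L q.2 := by rw [hrank, hEq]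
        simp [this]
    · have hq_lt : q.2 < nb := lt_of_le_of_ne hq_le (fun h => hEq h.symm)
      have hstep : pvRankStep (nb, rank, cnt, d) q
          = (q.2, rank + cnt + 1, 0, d.insert q.1 (rank + cnt + 1)) := by
        simp [pvRankStep, hEq]
      rw [hstep]
      have c1 : L.countP (fun p => decide (q.2 < p.2)) = P.length := by
        rw [hL, List.countP_append]
        have e1 : P.countP (fun p => decide (q.2 < p.2)) = P.length :=
          List.countP_eq_length.mpr (fun p hp => by
            have := hPge p hp; simp only [decide_eq_true_eq]; omega)
        have e2 : (q :: S').countP (fun p => decide (q.2 < p.2)) = 0 :=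
          List.countP_eq_zero.mpr (fun x hx => by
            rcases List.mem_cons.mp hx with h | h
            · subst h; simp
            · have := hS'le x h; simp only [decide_eq_true_eq]; omega)
        rw [e1, e2]; omega
      have c2 : L.countP (fun p => decide (nb < p.2))
          + P.countP (fun p => decide (p.2 = nb)) = P.length := by
        rw [hL, List.countP_append]
        have e2 : (q :: S').countP (fun p => decide (nb < p.2)) = 0 :=
          List.countP_eq_zero.mpr (fun x hx => by
            rcases List.mem_cons.mp hx with h | h
            · subst h; simp only [decide_eq_true_eq]; omega
            · have := hS'le x h; simp only [decide_eq_true_eq]; omega)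
        rw [e2, Nat.add_zero]
        exact countP_split P nb hPge
      have hkey : rank + cnt + 1 = pvG L q.2 := by
        rw [hrank, hcnt]
        unfold pvG
        rw [c1]
        omega
      refine ih (P ++ [q]) (by rw [hL]; simp) q.2 (rank + cnt + 1) 0 _ (by simp) ?_ hkey ?_ ?_
      · rw [hglast]
      · have e1 : P.countP (fun p => decide (p.2 = q.2)) = 0 :=
          List.countP_eq_zero.mpr (fun p hp => by
            have := hPge p hp; simp only [decide_eq_true_eq]; omega)
        rw [List.countP_append, e1]
        simp
      · rw [PySem.Dict.items_insert_of_not_contains d _ hfresh, hd, List.map_append]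
        simp [hkey]

lemma pvRankAll (L : List (Int × Int)) (hdesc : L.Pairwise (fun a b => b.2 ≤ a.2))
    (hnd : (L.map Prod.fst).Nodup)
    (h0 : ∀ h t, L = h :: t → h.2 ≠ -1) :
    (L.foldl pvRankStep (-1, 0, 0, PySem.Dict.empty)).2.2.2.items
      = L.map (fun p => (p.1, pvG L p.2)) := by
  cases L with
  | nil => rfl
  | cons h t =>
    have hne : h.2 ≠ -1 := h0 h t rfl
    have hne' : (-1 : ℤ) ≠ h.2 := fun he => hne he.symm
    have hstep : pvRankStep (-1, 0, 0, PySem.Dict.empty) h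
        = (h.2, 1, 0, PySem.Dict.empty.insert h.1 1) := by
      simp [pvRankStep, hne']
    have hmax : ∀ x ∈ (h :: t), x.2 ≤ h.2 := by
      intro x hx
      rcases List.mem_cons.mp hx with h1 | h1
      · subst h1; exact le_refl _
      · exact (List.pairwise_cons.mp hdesc).1 x h1
    have hg : pvG (h :: t) h.2 = 1 := by
      unfold pvG
      have : (h :: t).countP (fun p => decide (h.2 < p.2)) = 0 :=
        List.countP_eq_zero.mpr (fun x hx => by
          have := hmax x hx; simp only [decide_eq_true_eq]; omega)
      rw [this]; simp
    have hempty : (PySem.Dict.empty : PySem.Dict ℤ ℤ).contains h.1 = false := rfl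
    simp only [List.foldl_cons, hstep]
    refine pvRankLoop (h :: t) hdesc hnd t [h] rfl h.2 1 0 _ (by simp) (by simp) hg.symm
      (by simp) ?_
    rw [PySem.Dict.items_insert_of_not_contains _ _ hempty]
    simp [hg, PySem.Dict.empty]

lemma foldl_append_snd (l : List (Int × Int)) (init : List Int) :
    l.foldl (fun answer ans => answer ++ [ans.2]) init = init ++ l.map Prod.snd := by
  induction l generalizing init with
  | nil => simp
  | cons a l ih => simp [ih]

-- ===== VERDICT (by name: the statement is the Claim_ definition above) =====
-- a dict entry whose key is never re-inserted survives the ranking loop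
lemma pvRankStep_mem (S : List (ℤ × ℤ)) :
    ∀ (st : ℤ × ℤ × ℤ × PySem.Dict ℤ ℤ) (k v : ℤ),
      (k, v) ∈ st.2.2.2.items → (∀ q ∈ S, q.1 ≠ k) →
      (k, v) ∈ (S.foldl pvRankStep st).2.2.2.items := by
  induction S with
  | nil => intro st k v hm _; simpa using hm
  | cons q S' ih =>
    intro st k v hm hk
    have hne : ((k, v) : ℤ × ℤ).1 ≠ q.1 := fun h => (hk q List.mem_cons_self) h.symm
    simp only [List.foldl_cons]
    refine ih _ k v ?_ (fun r hr => hk r (List.mem_cons_of_mem _ hr))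
    by_cases hc : st.1 ≠ q.2
    · simp only [pvRankStep, if_pos hc]
      exact (PySem.Dict.mem_items_insert _ _ _ _).mpr (Or.inr ⟨hm, hne⟩)
    · simp only [pvRankStep, if_neg hc]
      exact (PySem.Dict.mem_items_insert _ _ _ _).mpr (Or.inr ⟨hm, hne⟩)

lemma pySum_eq (s : List ℤ) : pySum s = s.sum := by
  rw [List.sum_eq_foldl]; rfl

theorem solution_spec : Claim_unchanged_solution := by
  intro score _ hD
  have htot : score.map (fun s => s.foldl (· + ·) 0) = score.map pySum := rfl
  have h1 : (score.foldl (fun (st : PySem.Dict ℤ ℤ × ℤ) s =>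
      (st.1.insert st.2 (pySum s), st.2 + 1)) (PySem.Dict.empty, 0)).1.items
      = pvPairs (score.map pySum) 0 := by
    have hk : ∀ k ∈ (PySem.Dict.empty : PySem.Dict ℤ ℤ).keys, k < (0 : ℤ) := by
      intro k hk; simp [PySem.Dict.keys, PySem.Dict.empty] at hk
    simpa using pvBuild_items score PySem.Dict.empty 0 hk
  set totals := score.map pySum with htot2
  set L := PySem.List.sorted (pvPairs totals 0) (fun item => item.2) true with hLdef
  have hperm : L.Perm (pvPairs totals 0) := PySem.List.sorted_perm _ _ _
  have hdesc : L.Pairwise (fun a b => b.2 ≤ a.2) := PySem.List.sorted_pairwise_rev _ _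
  have hnd : (L.map Prod.fst).Nodup := by
    have hp : ((pvPairs totals 0).map Prod.fst).Pairwise (· < ·) :=
      (List.pairwise_map).mpr (pvPairs_fst_pairwise totals 0)
    exact ((hperm.map Prod.fst).nodup_iff).mpr (List.Pairwise.imp ne_of_lt hp)
  have h0 : ∀ h t, L = h :: t → h.2 ≠ -1 := by
    intro h t hht heq
    apply hD
    have hmemL : h ∈ L := by rw [hht]; exact List.mem_cons_self
    have hmemP : h ∈ pvPairs totals 0 := hperm.subset hmemL
    have hmemT : h.2 ∈ totals := pvPairs_snd_mem _ _ h hmemP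
    obtain ⟨s0, hs0, hsum0⟩ := List.mem_map.mp hmemT
    have hhead := PySem.List.key_head_sorted_rev_ge (pvPairs totals 0)
      (fun item => item.2) (hLdef.symm.trans hht)
    refine ⟨List.ne_nil_of_mem hs0, ?_, ⟨s0, hs0, ?_⟩⟩
    · intro s hs
      have hmem : pySum s ∈ totals := List.mem_map_of_mem hs
      obtain ⟨p, hp, hpe⟩ := pvPairs_mem_snd totals 0 _ hmem
      have h2 : p.2 ≤ h.2 := hhead p hp
      rw [← pySum_eq, ← hpe]
      omega
    · rw [← pySum_eq, hsum0, heq]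
  have h4 := pvRankAll L hdesc hnd h0
  have hsorted : PySem.List.sorted (L.map (fun p => (p.1, pvG L p.2))) (fun item => item.1) false
      = (pvPairs totals 0).map (fun p => (p.1, pvG L p.2)) := by
    refine PySem.List.sorted_eq_of_perm_of_pairwise_lt _ _ _ (hperm.map _).symm ?_
    exact (List.pairwise_map).mpr (pvPairs_fst_pairwise totals 0)
  have hgv : ∀ t ∈ totals, pvG L t = 1 + (totals.countP (fun u => decide (t < u)) : ℤ) := by
    intro t _
    unfold pvG
    rw [hperm.countP_eq, pvPairs_countP_snd totals 0 (fun u => decide (t < u))]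
  show solution score = solution_alt score
  unfold solution solution_alt
  simp only [htot, h1, ← hLdef, h4, hsorted, foldl_append_snd, List.nil_append,
    List.map_map]
  rw [show (Prod.snd ∘ fun p : ℤ × ℤ => (p.1, pvG L p.2)) = fun p : ℤ × ℤ => pvG L p.2 from rfl,
    pvPairs_map_snd]
  exact List.map_congr_left hgv

theorem solution_changed : Claim_changed_solution := by
  unfold Claim_changed_solution; decide

theorem solution_tight : Claim_exact_solution := by
  intro score _ hDcase heq
  obtain ⟨hne0, hle, s1, hs1, hsum1⟩ := hDcase
  have h1 : (score.foldl (fun (st : PySem.Dict ℤ ℤ × ℤ) s =>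
      (st.1.insert st.2 (pySum s), st.2 + 1)) (PySem.Dict.empty, 0)).1.items
      = pvPairs (score.map pySum) 0 := by
    have hk : ∀ k ∈ (PySem.Dict.empty : PySem.Dict ℤ ℤ).keys, k < (0 : ℤ) := by
      intro k hk; simp [PySem.Dict.keys, PySem.Dict.empty] at hk
    simpa using pvBuild_items score PySem.Dict.empty 0 hk
  set totals := score.map pySum with htot2
  set L := PySem.List.sorted (pvPairs totals 0) (fun item => item.2) true with hLdef
  have hperm : L.Perm (pvPairs totals 0) := PySem.List.sorted_perm _ _ _
  have hnd : (L.map Prod.fst).Nodup := by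
    have hp : ((pvPairs totals 0).map Prod.fst).Pairwise (· < ·) :=
      (List.pairwise_map).mpr (pvPairs_fst_pairwise totals 0)
    exact ((hperm.map Prod.fst).nodup_iff).mpr (List.Pairwise.imp ne_of_lt hp)
  obtain ⟨p1, hp1, hpe1⟩ := pvPairs_mem_snd totals 0 _ (List.mem_map_of_mem hs1)
  cases hLcase : L with
  | nil =>
    have : p1 ∈ L := hperm.mem_iff.mpr hp1
    rw [hLcase] at this
    simp at this
  | cons h t =>
    have hhead := PySem.List.key_head_sorted_rev_ge (pvPairs totals 0)
      (fun item => item.2) (hLdef.symm.trans hLcase)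
    have hh2 : h.2 = -1 := by
      have hub : p1.2 ≤ h.2 := hhead p1 hp1
      have hmemP : h ∈ pvPairs totals 0 := hperm.subset (hLcase ▸ List.mem_cons_self)
      have hmemT : h.2 ∈ totals := pvPairs_snd_mem _ _ h hmemP
      obtain ⟨s0, hs0, hsum0⟩ := List.mem_map.mp hmemT
      have hub0 := hle s0 hs0
      have e0 := pySum_eq s0
      have e1 := pySum_eq s1
      omega
    have hstep0 : pvRankStep (-1, 0, 0, PySem.Dict.empty) h
        = (-1, 0, 0 + 1, PySem.Dict.empty.insert h.1 0) := by
      simp [pvRankStep, hh2]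
    have hmem0 : ((h.1, (0 : ℤ)) ∈
        ((t.foldl pvRankStep (-1, 0, (0:ℤ) + 1, PySem.Dict.empty.insert h.1 0)).2.2.2.items)) := by
      apply pvRankStep_mem
      · exact (PySem.Dict.mem_items_insert _ _ _ _).mpr (Or.inl rfl)
      · intro q hq
        have hnd' := hnd
        rw [hLcase, List.map_cons, List.nodup_cons] at hnd'
        exact fun he => hnd'.1 (he ▸ List.mem_map_of_mem hq)
    have hsol : solution score
        = ((PySem.List.sorted
            ((t.foldl pvRankStep (-1, 0, (0:ℤ) + 1, PySem.Dict.empty.insert h.1 0)).2.2.2.items)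
            (fun item => item.1) false).foldl (fun answer ans => answer ++ [ans.2]) []) := by
      unfold solution
      simp only [h1, ← hLdef, hLcase, List.foldl_cons, hstep0]
    have hA0 : (0 : ℤ) ∈ solution score := by
      rw [hsol, foldl_append_snd, List.nil_append]
      refine List.mem_map.mpr ⟨(h.1, 0), ?_, rfl⟩
      exact (PySem.List.mem_sorted _ _ _ _).mpr hmem0

    have hBpos : ∀ x ∈ solution_alt score, (1 : ℤ) ≤ x := by
      intro x hx
      have hx' : x ∈ (score.map (fun s => s.foldl (· + ·) 0)).map
          (fun t => 1 + ((score.map (fun s => s.foldl (· + ·) 0)).countP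
            (fun u => decide (t < u)) : ℤ)) := hx
      obtain ⟨t0, _, rfl⟩ := List.mem_map.mp hx'
      omega
    rw [heq] at hA0
    exact absurd (hBpos 0 hA0) (by norm_num)
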